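-- pv_equiv track=rewrite | github.com/Aphoh/wrist | misc_scripts/indices.py | strided_indices
-- ===== SOURCE A (Python) =====
-- def _repeated_subgroup(group_size, repeats, base=0):
--     """
--         Outputs the sequence
--         [base, base+1, base+2, ..., base+group_size-1]
--         repeated `repeats` times
--     """
--     repeated = [base + i for i in range(group_size)]
--     return [a for _ in range(repeats) for a in repeated]
--
-- def strided_indices(world_size, stride, group_size):
--     num_groups = world_size // group_size
--     group_idxs = []
--     strided_subgroup_size = group_size * stride
--     n_repeats = strided_subgroup_size // stride
--     for base in range(0, num_groups, stride):
--         subgroup = _repeated_subgroup(stride, n_repeats, base)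
--         group_idxs.extend(subgroup)
--     # Map group_idxs back to ranks
--     groups = [[] for _ in range(num_groups)]
--     for i, idx in enumerate(group_idxs):
--         groups[idx].append(i)
--     return groups
-- ===== SOURCE B (Python) =====
-- def strided_indices(world_size, stride, group_size):
--     num_groups = world_size // group_size
--     n_repeats = (group_size * stride) // stride
--     groups = [[] for _ in range(num_groups)]
--     off = 0
--     for base in range(0, num_groups, stride):
--         for j in range(stride):
--             groups[base + j].extend(off + j + r * stride for r in range(n_repeats))
--         off += stride * n_repeats
--     return groups
-- ===== Notes on version B (the rewrite author's own statement) =====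
-- stated objective: simpler
-- what changed: Drops the intermediate flat group_idxs list and the enumerate/scatter pass: each group's member positions are computed directly from a running block offset and appended in place.
-- outside the precondition, e.g. on strided_indices(-5, 3, -2): A returns [[], []], B raises IndexError
import Mathlib
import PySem

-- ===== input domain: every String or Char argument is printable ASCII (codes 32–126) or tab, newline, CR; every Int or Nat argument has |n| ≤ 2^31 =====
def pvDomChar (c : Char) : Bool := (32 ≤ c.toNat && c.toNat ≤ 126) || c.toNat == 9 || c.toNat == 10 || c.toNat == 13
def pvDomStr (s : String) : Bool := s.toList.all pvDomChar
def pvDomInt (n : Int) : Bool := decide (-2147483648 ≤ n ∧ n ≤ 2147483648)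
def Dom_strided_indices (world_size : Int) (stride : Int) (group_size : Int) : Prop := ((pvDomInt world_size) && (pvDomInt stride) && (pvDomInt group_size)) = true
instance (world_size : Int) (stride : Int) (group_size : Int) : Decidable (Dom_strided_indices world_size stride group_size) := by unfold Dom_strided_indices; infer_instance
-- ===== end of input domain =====

-- B drops A's intermediate flat index list and enumerate/scatter pass, filling each group
-- directly from a running block offset (objective: simpler, same asymptotic cost).

-- ===== PORT A =====
-- helper _repeated_subgroup(group_size, repeats, base)
def pvRepeatedSubgroup (group_size : Int) (repeats : Int) (base : Int) : List Int :=
  let repeated := (PySem.List.pyRange 0 group_size 1).map (fun i => base + i)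
  (PySem.List.pyRange 0 repeats 1).flatMap (fun _ => repeated)

def strided_indices (world_size : Int) (stride : Int) (group_size : Int) : List (List Int) :=
  let num_groups := PySem.Int.floordiv world_size group_size
  let strided_subgroup_size := group_size * stride
  let n_repeats := PySem.Int.floordiv strided_subgroup_size stride   -- ZeroDivisionError for stride = 0: excluded by Pre_
  let group_idxs := (PySem.List.pyRange 0 num_groups stride).foldl
    (fun acc base => acc ++ pvRepeatedSubgroup stride n_repeats base) []
  let groups : List (List Int) := (PySem.List.pyRange 0 num_groups 1).map (fun _ => [])
  -- for i, idx in enumerate(group_idxs): groups[idx].append(i); IndexError (idx out of range) excluded by Pre_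
  (PySem.List.enumerate group_idxs 0).foldl
    (fun g p => PySem.List.pySetD g p.2 (PySem.List.pyGetD g p.2 [] ++ [p.1])) groups

-- ===== PORT B =====
def strided_indices_alt (world_size : Int) (stride : Int) (group_size : Int) : List (List Int) :=
  let num_groups := PySem.Int.floordiv world_size group_size
  let n_repeats := PySem.Int.floordiv (group_size * stride) stride   -- ZeroDivisionError for stride = 0: excluded by Pre_
  let groups : List (List Int) := (PySem.List.pyRange 0 num_groups 1).map (fun _ => [])
  ((PySem.List.pyRange 0 num_groups stride).foldl
    (fun (st : List (List Int) × Int) base =>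
      -- for j in range(stride): groups[base+j].extend(off + j + r*stride for r in range(n_repeats))
      ((PySem.List.pyRange 0 stride 1).foldl
        (fun g j => PySem.List.pySetD g (base + j)
          (PySem.List.pyGetD g (base + j) [] ++
            (PySem.List.pyRange 0 n_repeats 1).map (fun r => st.2 + j + r * stride))) st.1,
       st.2 + stride * n_repeats))
    (groups, 0)).1

-- ===== PRECONDITION & SPEC =====
-- Pre_ excludes stride = 0 and group_size = 0 (ZeroDivisionError in A) and the inputs whose flat
-- indices run past num_groups (stride > 0, num_groups > 0, num_groups % stride ≠ 0): there A raises
-- IndexError except when group_size < 0, where A accidentally returns all-empty groups while B's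
-- direct scatter raises the IndexError (see cites).
def Pre_strided_indices (world_size : Int) (stride : Int) (group_size : Int) : Prop :=
  stride ≠ 0 ∧ group_size ≠ 0 ∧
    (0 < stride → 0 < PySem.Int.floordiv world_size group_size →
      PySem.Int.mod (PySem.Int.floordiv world_size group_size) stride = 0)
instance (world_size : Int) (stride : Int) (group_size : Int) : Decidable (Pre_strided_indices world_size stride group_size) := by unfold Pre_strided_indices; infer_instance
def pvWitness_strided_indices : Int × Int × Int := (8, 2, 2)

def Spec_strided_indices (world_size : Int) (stride : Int) (group_size : Int) (out : List (List Int)) : Prop := out = strided_indices_alt world_size stride group_size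
instance (world_size : Int) (stride : Int) (group_size : Int) (out : List (List Int)) : Decidable (Spec_strided_indices world_size stride group_size out) := by unfold Spec_strided_indices; infer_instance

-- ===== CLAIM (what is proved, stated in full; the proofs are below) =====
def Claim_equal_strided_indices : Prop := ∀ (world_size : Int) (stride : Int) (group_size : Int), Dom_strided_indices world_size stride group_size → Pre_strided_indices world_size stride group_size → Spec_strided_indices world_size stride group_size (strided_indices world_size stride group_size)

-- ===== LEMMAS AND PROOFS =====

theorem pvScatter_length (S : Nat) (F : Nat → List Int) (base : Nat) (g : List (List Int)) :
    ((List.range S).foldl (fun g j => g.set (base + j) (g.getD (base + j) [] ++ F j)) g).length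
      = g.length := by
  induction S generalizing g with
  | zero => rfl
  | succ n ih =>
      rw [List.range_succ, List.foldl_append]
      simp only [List.foldl_cons, List.foldl_nil, List.length_set]
      exact ih g

theorem pvScatter_getElem? (S : Nat) (F : Nat → List Int) (base : Nat) :
    ∀ (g : List (List Int)), base + S ≤ g.length → ∀ (t : Nat),
    ((List.range S).foldl (fun g j => g.set (base + j) (g.getD (base + j) [] ++ F j)) g)[t]?
      = if base ≤ t ∧ t < base + S then g[t]?.map (· ++ F (t - base)) else g[t]? := by
  induction S with
  | zero => intro g _ t; simp
  | succ n ih =>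
      intro g hlen t
      rw [List.range_succ, List.foldl_append]
      set prev := (List.range n).foldl (fun g j => g.set (base + j) (g.getD (base + j) [] ++ F j)) g with hprev
      have hpl : prev.length = g.length := pvScatter_length n F base g
      have hb : base + n < g.length := by omega
      simp only [List.foldl_cons, List.foldl_nil]
      rw [List.getElem?_set]
      have hget : prev.getD (base + n) [] = (g[base+n]?).getD [] := by
        rw [List.getD_eq_getElem?_getD, ih g (by omega) (base + n)]
        simp
      by_cases h1 : base + n = t
      · subst h1
        rw [if_pos rfl, if_pos (by omega : base + n < prev.length)]
        rw [if_pos (by omega : base ≤ base + n ∧ base + n < base + (n+1))]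
        rw [hget]
        have : (g[base+n]?).isSome := by
          rw [List.getElem?_eq_getElem hb]; rfl
        obtain ⟨row, hrow⟩ := Option.isSome_iff_exists.mp this
        simp [hrow]
      · rw [if_neg h1, ih g (by omega) t]
        by_cases h2 : base ≤ t ∧ t < base + n
        · rw [if_pos h2, if_pos (by omega)]
        · rw [if_neg h2, if_neg (by omega)]

def pvApp (g : List (List Int)) (p : Int × Int) : List (List Int) :=
  PySem.List.pySetD g p.2 (PySem.List.pyGetD g p.2 [] ++ [p.1])
def pvScat (g : List (List Int)) (l : List (Int × Int)) : List (List Int) := l.foldl pvApp g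

theorem pvScatter_comp (S : Nat) (F1 F2 : Nat → List Int) (base : Nat)
    (g : List (List Int)) (h : base + S ≤ g.length) :
    (List.range S).foldl (fun g j => g.set (base + j) (g.getD (base + j) [] ++ F2 j))
      ((List.range S).foldl (fun g j => g.set (base + j) (g.getD (base + j) [] ++ F1 j)) g)
    = (List.range S).foldl (fun g j => g.set (base + j) (g.getD (base + j) [] ++ (F1 j ++ F2 j))) g := by
  apply List.ext_getElem?
  intro t
  have h1 := pvScatter_length S F1 base g
  rw [pvScatter_getElem? S F2 base _ (by omega) t, pvScatter_getElem? S F1 base g h t,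
      pvScatter_getElem? S (fun j => F1 j ++ F2 j) base g h t]
  by_cases ht : base ≤ t ∧ t < base + S
  · rw [if_pos ht, if_pos ht, if_pos ht, Option.map_map]
    cases g[t]? <;> simp [List.append_assoc]
  · rw [if_neg ht, if_neg ht, if_neg ht]

theorem pvEnumerate_map_range {α : Type} (f : Nat → α) (s : Int) (S : Nat) :
    PySem.List.enumerate ((List.range S).map f) s = (List.range S).map (fun (k : Nat) => ((s + k : Int), f k)) := by
  induction S generalizing s with
  | zero => rfl
  | succ n ih =>
      rw [List.range_succ, List.map_append, PySem.List.enumerate_append, ih, List.map_append]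
      simp [PySem.List.enumerate_cons]

theorem pvPass (S : Nat) (bn : Nat) (c : Int) (g : List (List Int)) :
    pvScat g (PySem.List.enumerate ((PySem.List.pyRange 0 (S : Int) 1).map (fun i => (bn : Int) + i)) c)
      = (List.range S).foldl (fun g j => g.set (bn + j) (g.getD (bn + j) [] ++ [c + (j : Int)])) g := by
  rw [PySem.List.pyRange_one]
  simp only [sub_zero, Int.toNat_natCast, List.map_map]
  have hmap : ((fun i => (bn : Int) + i) ∘ fun k : Nat => (0 : Int) + ↑k) = fun k : Nat => ((bn : Int) + ↑k) := by
    funext k; simp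
  rw [hmap, pvEnumerate_map_range (fun k : Nat => ((bn : Int) + ↑k)) c S, pvScat, List.foldl_map]
  have hfun : (fun (g : List (List Int)) (k : Nat) => pvApp g (c + ↑k, (bn : Int) + ↑k))
      = fun g j => g.set (bn + j) (g.getD (bn + j) [] ++ [c + (j : Int)]) := by
    funext g k
    have hc : ((bn : Int) + ↑k) = ((bn + k : Nat) : Int) := by push_cast; ring
    simp only [pvApp]
    rw [hc, PySem.List.pySetD_natCast, PySem.List.pyGetD_natCast]
  rw [hfun]


theorem pvScat_append (g : List (List Int)) (l1 l2 : List (Int × Int)) :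
    pvScat g (l1 ++ l2) = pvScat (pvScat g l1) l2 := List.foldl_append ..

theorem pvRepeated_length (S N : Nat) (b : Int) :
    (pvRepeatedSubgroup (S : Int) (N : Int) b).length = N * S := by
  rw [pvRepeatedSubgroup]
  rw [PySem.List.pyRange_one 0 (N : Int), PySem.List.pyRange_one 0 (S : Int)]
  simp only [sub_zero, Int.toNat_natCast, List.flatMap_map, List.length_flatMap, List.map_map,
    Function.comp_def, List.length_map, List.length_range]
  simp [List.map_const', List.sum_replicate, Nat.mul_comm]

theorem pvScatter_nilF (S : Nat) (bn : Nat) (g : List (List Int)) (h : bn + S ≤ g.length) :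
    (List.range S).foldl (fun g j => g.set (bn + j) (g.getD (bn + j) [] ++ [])) g = g := by
  apply List.ext_getElem?
  intro t
  rw [pvScatter_getElem? S (fun _ => []) bn g h t]
  by_cases ht : bn ≤ t ∧ t < bn + S
  · rw [if_pos ht]; cases g[t]? <;> simp
  · rw [if_neg ht]

theorem pvBlockA (S N : Nat) (bn : Nat) (c : Int) (g : List (List Int)) (h : bn + S ≤ g.length) :
    pvScat g (PySem.List.enumerate (pvRepeatedSubgroup (S : Int) (N : Int) (bn : Int)) c)
      = (List.range S).foldl (fun g j => g.set (bn + j)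
          (g.getD (bn + j) [] ++ (List.range N).map (fun (r : Nat) => c + (r : Int) * (S : Int) + (j : Int)))) g := by
  induction N with
  | zero =>
      have h0 : pvRepeatedSubgroup (S : Int) ((0 : Nat) : Int) (bn : Int) = [] := by
        simp [pvRepeatedSubgroup, PySem.List.pyRange_one]
      rw [h0]
      simp only [List.range_zero, List.map_nil]
      rw [show PySem.List.enumerate ([] : List Int) c = [] from rfl]
      rw [show pvScat g [] = g from rfl]
      exact (pvScatter_nilF S bn g h).symm
  | succ n ih =>
      have hsplit : pvRepeatedSubgroup (S : Int) ((n+1 : Nat) : Int) (bn : Int)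
          = pvRepeatedSubgroup (S : Int) ((n : Nat) : Int) (bn : Int)
            ++ (PySem.List.pyRange 0 (S : Int) 1).map (fun i => (bn : Int) + i) := by
        rw [pvRepeatedSubgroup, pvRepeatedSubgroup]
        rw [show ((n+1 : Nat) : Int) = (n : Int) + 1 by push_cast; ring]
        rw [PySem.List.pyRange_one_succ_right (show (0:Int) ≤ (n:Int) from Int.natCast_nonneg n), List.flatMap_append]
        simp
      rw [hsplit, PySem.List.enumerate_append, pvScat_append, pvRepeated_length, ih,
          pvPass S bn (c + ((n * S : Nat) : Int)),
          pvScatter_comp S _ _ bn g h]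
      apply PySem.List.foldl_congr_mem
      intro acc j _
      congr 1
      simp only [List.range_succ, List.map_append, List.map_cons, List.map_nil, Nat.cast_mul]

def pvBstep (stride nr : Int) (st : List (List Int) × Int) (base : Int) : List (List Int) × Int :=
  ((PySem.List.pyRange 0 stride 1).foldl
    (fun g j => PySem.List.pySetD g (base + j)
      (PySem.List.pyGetD g (base + j) [] ++
        (PySem.List.pyRange 0 nr 1).map (fun r => st.2 + j + r * stride))) st.1,
   st.2 + stride * nr)

theorem pvInnerB_eq (S N : Nat) (bn : Nat) (c : Int) (g : List (List Int)) :
    (pvBstep (S : Int) (N : Int) (g, c) (bn : Int)).1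
      = (List.range S).foldl (fun g j => g.set (bn + j)
          (g.getD (bn + j) [] ++ (List.range N).map (fun (r : Nat) => c + (r : Int) * (S : Int) + (j : Int)))) g := by
  simp only [pvBstep]
  rw [PySem.List.pyRange_one 0 (S : Int)]
  simp only [sub_zero, Int.toNat_natCast]
  rw [List.foldl_map]
  apply PySem.List.foldl_congr_mem
  intro acc k _
  have hc : ((bn : Int) + (0 + (k : Int))) = ((bn + k : Nat) : Int) := by push_cast; ring
  rw [hc, PySem.List.pySetD_natCast, PySem.List.pyGetD_natCast]
  congr 1
  congr 1
  rw [PySem.List.pyRange_one 0 (N : Int)]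
  simp only [sub_zero, Int.toNat_natCast, List.map_map]
  apply List.map_congr_left
  intro r _
  simp only [Function.comp_apply]
  ring

theorem pvOuter (S N : Nat) (bs : List Int) :
    ∀ (g : List (List Int)) (c : Int),
    (∀ b ∈ bs, ∃ bn : Nat, b = (bn : Int) ∧ bn + S ≤ g.length) →
    pvScat g (PySem.List.enumerate (bs.flatMap (fun b => pvRepeatedSubgroup (S : Int) (N : Int) b)) c)
      = (bs.foldl (pvBstep (S : Int) (N : Int)) (g, c)).1 := by
  induction bs with
  | nil => intro g c _; rfl
  | cons b bs ih =>
      intro g c hb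
      obtain ⟨bn, rfl, hlen⟩ := hb b List.mem_cons_self
      rw [List.flatMap_cons, PySem.List.enumerate_append, pvScat_append, pvRepeated_length,
          pvBlockA S N bn c g hlen, ← pvInnerB_eq S N bn c g, List.foldl_cons]
      have hsnd : c + ((N * S : Nat) : Int) = (pvBstep (S : Int) (N : Int) (g, c) (bn : Int)).2 := by
        simp only [pvBstep]; push_cast; ring
      rw [hsnd]
      have hgl : ((pvBstep (S : Int) (N : Int) (g, c) (bn : Int)).1).length = g.length := by
        rw [pvInnerB_eq]; exact pvScatter_length S _ bn g
      have := ih (pvBstep (S : Int) (N : Int) (g, c) (bn : Int)).1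
        (pvBstep (S : Int) (N : Int) (g, c) (bn : Int)).2
        (by intro b hbmem; obtain ⟨bn', hb', hl'⟩ := hb b (List.mem_cons_of_mem _ hbmem)
            exact ⟨bn', hb', by omega⟩)
      rw [this]

theorem pvSetGet_self (g : List (List Int)) (i : Int) :
    PySem.List.pySetD g i (PySem.List.pyGetD g i []) = g := by
  simp only [PySem.List.pySetD, PySem.List.pySet?, PySem.List.pyGetD, PySem.List.pyGet?,
    PySem.List.pyIdx?]
  split_ifs with h1 h2 h3 <;> simp_all
  have hk : g.length - (-i).toNat < g.length := by omega
  rw [List.getElem?_eq_getElem hk]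
  simp [List.set_getElem_self]

theorem pvSetD_nil {α : Type} (i : Int) (v : α) : PySem.List.pySetD ([] : List α) i v = [] := by
  simp only [PySem.List.pySetD, PySem.List.pySet?, PySem.List.pyIdx?]
  split_ifs <;> simp_all

theorem pvScat_nil_left (l : List (Int × Int)) : pvScat [] l = [] := by
  induction l with
  | nil => rfl
  | cons p l ih => simpa [pvScat, List.foldl_cons, pvApp, pvSetD_nil] using ih

theorem pvFoldl_fst {β : Type} (bs : List β)
    (h : (List (List Int) × Int) → β → Int) (st : List (List Int) × Int) :
    (bs.foldl (fun st b => (st.1, h st b)) st).1 = st.1 := by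
  induction bs generalizing st with
  | nil => rfl
  | cons b bs ih => simp only [List.foldl_cons]; rw [ih]

theorem pvFoldl_nil_fix {β : Type} (l : List β) (f : List (List Int) → β → List (List Int))
    (h : ∀ x, f [] x = []) : l.foldl f [] = [] := by
  induction l with
  | nil => rfl
  | cons x l ih => rw [List.foldl_cons, h x]; exact ih

theorem pvFoldl_fst_nil {β : Type} (bs : List β)
    (step : (List (List Int) × Int) → β → (List (List Int) × Int))
    (h : ∀ st b, st.1 = [] → (step st b).1 = []) :
    ∀ st, st.1 = [] → (bs.foldl step st).1 = [] := by
  induction bs with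
  | nil => intro st hst; simpa using hst
  | cons b bs ih => intro st hst; rw [List.foldl_cons]; exact ih _ (h st b hst)

-- ===== VERDICT (by name: the statement is the Claim_ definition above) =====
theorem strided_indices_spec : Claim_equal_strided_indices := by
  intro ws stride gs _ hpre
  obtain ⟨hs0, hg0, hdiv⟩ := hpre
  show strided_indices ws stride gs = strided_indices_alt ws stride gs
  have happ : (fun (g : List (List Int)) (p : Int × Int) =>
      PySem.List.pySetD g p.2 (PySem.List.pyGetD g p.2 [] ++ [p.1])) = pvApp := rfl
  simp only [strided_indices, strided_indices_alt]
  rcases lt_trichotomy stride 0 with hneg | hz | hpos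
  · -- stride < 0: both sides are the untouched list of empty groups
    have hseg : PySem.List.pyRange 0 stride 1 = [] := PySem.List.pyRange_one_eq_nil (by omega)
    have hrep : ∀ b : Int, pvRepeatedSubgroup stride (PySem.Int.floordiv (gs * stride) stride) b = [] := by
      intro b; simp [pvRepeatedSubgroup, hseg]
    simp only [hrep, hseg, List.append_nil, PySem.List.foldl_ignore, List.foldl_nil,
      PySem.List.enumerate_nil]
    rw [pvFoldl_fst]
  · exact absurd hz hs0
  · -- 0 < stride
    have hnr : PySem.Int.floordiv (gs * stride) stride = gs := by
      rw [PySem.Int.floordiv_eq_ediv_of_pos hpos]; exact Int.mul_ediv_cancel gs hs0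
    simp only [hnr]
    set q := PySem.Int.floordiv ws gs with hq
    by_cases hql : q ≤ 0
    · -- num_groups ≤ 0: no groups on either side
      have hgr : PySem.List.pyRange 0 q 1 = [] := PySem.List.pyRange_one_eq_nil (by omega)
      simp only [hgr, List.map_nil]
      rw [happ]
      have hA : ∀ l : List (Int × Int), List.foldl pvApp [] l = [] := fun l => pvScat_nil_left l
      rw [hA]
      refine (pvFoldl_fst_nil _ _ ?_ ([], 0) rfl).symm
      intro st b hst
      simp only
      rw [hst]
      exact pvFoldl_nil_fix _ _ (fun x => by rw [pvSetD_nil])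
    · have hqg : 0 < q := by omega
      rcases lt_trichotomy gs 0 with hgneg | h0 | hgpos
      · -- group_size < 0: n_repeats < 0, every subgroup/extension is empty
        have hrg : PySem.List.pyRange 0 gs 1 = [] := PySem.List.pyRange_one_eq_nil (by omega)
        have hrep : ∀ b : Int, pvRepeatedSubgroup stride gs b = [] := by
          intro b; simp [pvRepeatedSubgroup, hrg]
        simp only [hrep, List.append_nil, PySem.List.foldl_ignore, PySem.List.enumerate_nil,
          List.foldl_nil, hrg, List.map_nil, pvSetGet_self]
        rw [pvFoldl_fst]
      · exact absurd h0 hg0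
      · -- main case: 0 < stride, 0 < group_size, 0 < num_groups, stride ∣ num_groups
        have hS : ((stride.toNat : Nat) : Int) = stride := Int.toNat_of_nonneg hpos.le
        have hN : ((gs.toNat : Nat) : Int) = gs := Int.toNat_of_nonneg hgpos.le
        set S := stride.toNat with hSdef
        set N := gs.toNat with hNdef
        rw [← hS, ← hN]
        rw [PySem.List.foldl_append_eq_flatMap, List.nil_append, happ]
        have hdvq : ((S : Nat) : Int) ∣ q := by
          rw [hS]
          exact (PySem.Int.mod_eq_zero_iff_dvd q stride).mp (hdiv hpos hqg)
        have hlen : ((PySem.List.pyRange 0 q 1).map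
            (fun _ => ([] : List Int))).length = q.toNat := by
          rw [List.length_map, PySem.List.length_pyRange_one]; simp
        have hcond : ∀ b ∈ PySem.List.pyRange 0 q ((S : Nat) : Int), ∃ bn : Nat,
            b = (bn : Int) ∧ bn + S ≤ ((PySem.List.pyRange 0 q 1).map (fun _ => ([] : List Int))).length := by
          intro b hb
          rw [PySem.List.mem_pyRange_iff_of_pos (by rw [hS]; exact hpos)] at hb
          obtain ⟨hb0, hbq, hbd⟩ := hb
          rw [sub_zero] at hbd
          have hle : ((S : Nat) : Int) ≤ q - b :=
            Int.le_of_dvd (by omega) (dvd_sub hdvq hbd)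
          refine ⟨b.toNat, by omega, ?_⟩
          rw [hlen]; omega
        have hA := pvOuter S N (PySem.List.pyRange 0 q ((S : Nat) : Int))
          ((PySem.List.pyRange 0 q 1).map (fun _ => ([] : List Int))) 0 hcond
        rw [show (∀ l : List (Int × Int),
            List.foldl pvApp ((PySem.List.pyRange 0 q 1).map (fun _ => ([] : List Int))) l
            = pvScat ((PySem.List.pyRange 0 q 1).map (fun _ => ([] : List Int))) l) from fun l => rfl]
        rw [hA]
        rfl
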